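-- pv_equiv track=rewrite | github.com/PhillipAlexanderYoung/Knoxnet-vms-beta | services/vision_local/runners/llava.py | _parse_boolean_lines
-- ===== SOURCE A (Python) =====
-- from typing import Dict, List
--
-- def _parse_boolean_lines(text: str, criteria: List[str]) -> Dict[str, bool]:
--     verdict = {}
--     for criterion in criteria:
--         verdict[criterion] = False
--     for line in text.splitlines():
--         line_lower = line.lower()
--         for criterion in criteria:
--             key = criterion.lower()
--             if key in line_lower:
--                 verdict[criterion] = "yes" in line_lower or "true" in line_lower
--     return verdict
-- ===== SOURCE B (Python) =====
-- def _parse_boolean_lines(text, criteria):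
--     lines_lower = [line.lower() for line in text.splitlines()]
--     verdict = {}
--     for criterion in dict.fromkeys(criteria):
--         key = criterion.lower()
--         value = False
--         for line_lower in reversed(lines_lower):
--             if key in line_lower:
--                 value = "yes" in line_lower or "true" in line_lower
--                 break
--         verdict[criterion] = value
--     return verdict
-- ===== Notes on version B (the rewrite author's own statement) =====
-- stated objective: alternative
-- what changed: A initialises every criterion to False and forward-accumulates over a lines x criteria nested scan with last-match-wins overwrites in a dict; B iterates once per distinct criterion and scans the pre-lowercased lines in reverse with an early break at the first match, so no accumulator dict is threaded through the lines.
import Mathlib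
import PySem

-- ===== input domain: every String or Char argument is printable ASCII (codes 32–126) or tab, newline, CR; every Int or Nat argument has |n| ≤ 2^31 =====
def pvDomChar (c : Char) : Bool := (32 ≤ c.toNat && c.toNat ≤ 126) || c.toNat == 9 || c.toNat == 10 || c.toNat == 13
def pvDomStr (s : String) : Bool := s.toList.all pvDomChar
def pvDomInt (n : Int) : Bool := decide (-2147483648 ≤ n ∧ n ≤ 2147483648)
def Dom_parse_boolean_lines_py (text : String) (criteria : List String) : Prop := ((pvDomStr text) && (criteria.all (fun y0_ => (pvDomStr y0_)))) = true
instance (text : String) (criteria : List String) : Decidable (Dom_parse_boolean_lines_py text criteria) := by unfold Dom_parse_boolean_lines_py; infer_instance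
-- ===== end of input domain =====

-- B replaces A's forward accumulation over a nested line×criteria scan by a per-criterion
-- reverse search with early exit (alternative decomposition; last-match-wins is preserved).

-- ===== PORT A =====
def parse_boolean_lines_py (text : String) (criteria : List String) : List (String × Bool) :=
  let verdict : PySem.Dict String Bool :=
    criteria.foldl (fun d criterion => PySem.Dict.insert d criterion false) PySem.Dict.empty
  let verdict :=
    (PySem.Str.splitlines text).foldl (fun d line =>
      let line_lower := PySem.Str.lower line
      criteria.foldl (fun d criterion =>
        let key := PySem.Str.lower criterion
        if PySem.Str.isIn key line_lower then
          PySem.Dict.insert d criterion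
            (PySem.Str.isIn "yes" line_lower || PySem.Str.isIn "true" line_lower)
        else d) d) verdict
  verdict.items

-- ===== PORT B =====
-- reversed(lines_lower) scan with early break: first match from the end decides
def pvRevSearch (key : String) (revLines : List String) : Bool :=
  match revLines with
  | [] => false
  | line_lower :: rest =>
    if PySem.Str.isIn key line_lower then
      PySem.Str.isIn "yes" line_lower || PySem.Str.isIn "true" line_lower
    else pvRevSearch key rest

def parse_boolean_lines_py_alt (text : String) (criteria : List String) : List (String × Bool) :=
  let lines_lower := (PySem.Str.splitlines text).map PySem.Str.lower
  (PySem.List.dedup criteria).map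
    (fun criterion => (criterion, pvRevSearch (PySem.Str.lower criterion) lines_lower.reverse))

-- ===== PRECONDITION & SPEC =====
def Spec_parse_boolean_lines_py (text : String) (criteria : List String) (out : List (String × Bool)) : Prop := out = parse_boolean_lines_py_alt text criteria
instance (text : String) (criteria : List String) (out : List (String × Bool)) : Decidable (Spec_parse_boolean_lines_py text criteria out) := by unfold Spec_parse_boolean_lines_py; infer_instance

-- ===== CLAIM (what is proved, stated in full; the proofs are below) =====
def Claim_equal_parse_boolean_lines_py : Prop := ∀ (text : String) (criteria : List String), Dom_parse_boolean_lines_py text criteria → Spec_parse_boolean_lines_py text criteria (parse_boolean_lines_py text criteria)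

-- ===== LEMMAS AND PROOFS =====

-- the yes/true verdict of one (already lowercased) line
def pvVal (ll : String) : Bool := PySem.Str.isIn "yes" ll || PySem.Str.isIn "true" ll

-- forward accumulation of A, as a value function over the (raw) lines
def pvFwd (lines : List String) (f : String → Bool) : String → Bool :=
  match lines with
  | [] => f
  | line :: rest =>
    pvFwd rest (fun k =>
      if PySem.Str.isIn (PySem.Str.lower k) (PySem.Str.lower line) then pvVal (PySem.Str.lower line)
      else f k)

-- pvRevSearch with an explicit default
def pvRevD (key : String) (rs : List String) (d : Bool) : Bool :=
  match rs with
  | [] => d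
  | l :: r => if PySem.Str.isIn key l then pvVal l else pvRevD key r d

theorem pvRevSearch_eq_pvRevD (key : String) (rs : List String) :
    pvRevSearch key rs = pvRevD key rs false := by
  induction rs with
  | nil => rfl
  | cons l r ih => simp [pvRevSearch, pvRevD, pvVal, ih]

theorem pvRevD_append (key : String) (rs : List String) (l : String) (d : Bool) :
    pvRevD key (rs ++ [l]) d = pvRevD key rs (if PySem.Str.isIn key l then pvVal l else d) := by
  induction rs with
  | nil => rfl
  | cons x r ih => simp [pvRevD, ih]

theorem pvFwd_eq_pvRevD (lines : List String) (f : String → Bool) (k : String) :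
    pvFwd lines f k = pvRevD (PySem.Str.lower k) ((lines.map PySem.Str.lower).reverse) (f k) := by
  induction lines generalizing f with
  | nil => rfl
  | cons line rest ih =>
    simp only [pvFwd, List.map_cons, List.reverse_cons, ih, pvRevD_append]

-- inserting into a dict in map-over-keys form, at a key already present
theorem pvInsert_map (ks : List String) (f : String → Bool) (c : String) (v : Bool)
    (hc : c ∈ ks) :
    PySem.Dict.insert ⟨ks.map fun k => (k, f k)⟩ c v
      = ⟨ks.map fun k => (k, if k = c then v else f k)⟩ := by
  have hcont : (PySem.Dict.contains (⟨ks.map fun k => (k, f k)⟩ : PySem.Dict String Bool) c) = true := by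
    simp [PySem.Dict.contains, List.any_eq_true]
    exact hc
  simp only [PySem.Dict.insert, hcont, if_pos]
  congr 1
  simp only [List.map_map]
  apply List.map_congr_left
  intro k _
  by_cases h : k = c <;> simp [h, Function.comp]

-- A's inner loop over the criteria, on a dict in map form over keys ks ⊇ criteria
theorem pvInner (ll : String) (ks : List String) :
    ∀ (cs : List String) (f : String → Bool), (∀ c ∈ cs, c ∈ ks) →
    (cs.foldl (fun d criterion =>
        if PySem.Str.isIn (PySem.Str.lower criterion) ll then
          PySem.Dict.insert d criterion (pvVal ll)
        else d) (⟨ks.map fun k => (k, f k)⟩ : PySem.Dict String Bool))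
      = ⟨ks.map fun k => (k, if k ∈ cs ∧ PySem.Str.isIn (PySem.Str.lower k) ll then pvVal ll else f k)⟩ := by
  intro cs
  induction cs with
  | nil => intro f _; simp
  | cons c rest ih =>
    intro f h
    by_cases hin : PySem.Str.isIn (PySem.Str.lower c) ll = true
    · rw [List.foldl_cons, if_pos hin, pvInsert_map ks f c (pvVal ll) (h c (by simp)),
        ih _ (fun x hx => h x (by simp [hx]))]
      congr 1
      apply List.map_congr_left
      intro k _
      by_cases hkc : k = c
      · subst hkc
        have hin' : PySem.Chars.isIn (PySem.Chars.lower k.toList) ll.toList = true := by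
          simpa using hin
        simp [hin']
      · simp [hkc]
    · rw [List.foldl_cons, if_neg hin, ih _ (fun x hx => h x (by simp [hx]))]
      congr 1
      apply List.map_congr_left
      intro k _
      by_cases hkc : k = c
      · subst hkc
        have hin' : PySem.Chars.isIn (PySem.Chars.lower k.toList) ll.toList = false := by
          simpa using hin
        simp [hin']
      · simp [hkc]

-- A's outer loop over the lines, tracked as pvFwd
theorem pvOuter (criteria : List String) (ks : List String)
    (hks : ∀ c ∈ ks, c ∈ criteria)
    (hsub : ∀ c ∈ criteria, c ∈ ks) :
    ∀ (lines : List String) (f : String → Bool),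
    (lines.foldl (fun d line =>
        let line_lower := PySem.Str.lower line
        criteria.foldl (fun d criterion =>
          let key := PySem.Str.lower criterion
          if PySem.Str.isIn key line_lower then
            PySem.Dict.insert d criterion
              (PySem.Str.isIn "yes" line_lower || PySem.Str.isIn "true" line_lower)
          else d) d) (⟨ks.map fun k => (k, f k)⟩ : PySem.Dict String Bool))
      = ⟨ks.map fun k => (k, pvFwd lines f k)⟩ := by
  intro lines
  induction lines with
  | nil => intro f; simp [pvFwd]
  | cons line rest ih =>
    intro f
    rw [List.foldl_cons]
    show (rest.foldl _ (criteria.foldl (fun d criterion =>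
        if PySem.Str.isIn (PySem.Str.lower criterion) (PySem.Str.lower line) then
          PySem.Dict.insert d criterion (pvVal (PySem.Str.lower line))
        else d) (⟨ks.map fun k => (k, f k)⟩ : PySem.Dict String Bool))) = _
    rw [pvInner (PySem.Str.lower line) ks criteria f hsub]
    have : ⟨ks.map fun k => (k, if k ∈ criteria ∧ PySem.Str.isIn (PySem.Str.lower k) (PySem.Str.lower line) then pvVal (PySem.Str.lower line) else f k)⟩
        = (⟨ks.map fun k => (k, (fun k => if PySem.Str.isIn (PySem.Str.lower k) (PySem.Str.lower line) then pvVal (PySem.Str.lower line) else f k) k)⟩ : PySem.Dict String Bool) := by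
      congr 1
      apply List.map_congr_left
      intro k hk
      simp [hks k hk]
      
    rw [this, ih]
    rfl

-- A's initialisation loop produces the dedup'd keys, all mapped to false
theorem pvInit (cs : List String) :
    ∀ (ds : List String),
    (cs.foldl (fun d criterion => PySem.Dict.insert d criterion false)
        (⟨ds.map fun k => (k, false)⟩ : PySem.Dict String Bool))
      = ⟨(cs.foldl PySem.Set.add ds).map fun k => (k, false)⟩ := by
  induction cs with
  | nil => intro ds; rfl
  | cons c rest ih =>
    intro ds
    rw [List.foldl_cons, List.foldl_cons]
    by_cases hc : c ∈ ds
    · have h1 : PySem.Dict.insert (⟨ds.map fun k => (k, false)⟩ : PySem.Dict String Bool) c false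
          = ⟨ds.map fun k => (k, false)⟩ := by
        have hcont : (PySem.Dict.contains (⟨ds.map fun k => (k, false)⟩ : PySem.Dict String Bool) c) = true := by
          simp [PySem.Dict.contains, List.any_eq_true]
          exact hc
        simp only [PySem.Dict.insert, hcont, if_pos]
        congr 1
        simp only [List.map_map]
        apply List.map_congr_left
        intro k _
        by_cases h : k = c <;> simp [h, Function.comp]
      have h2 : PySem.Set.add ds c = ds := by
        simp [PySem.Set.add]
        exact hc
      rw [h1, h2]
      exact ih ds
    · have hcont : (PySem.Dict.contains (⟨ds.map fun k => (k, false)⟩ : PySem.Dict String Bool) c) = false := by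
        simp [PySem.Dict.contains]
        exact fun x hx hxc => hc (hxc ▸ hx)
      have h1 : PySem.Dict.insert (⟨ds.map fun k => (k, false)⟩ : PySem.Dict String Bool) c false
          = ⟨(ds ++ [c]).map fun k => (k, false)⟩ := by
        simp [PySem.Dict.insert, hcont]
      have h2 : PySem.Set.add ds c = ds ++ [c] := by
        simp [PySem.Set.add]
        exact hc
      rw [h1, h2]
      exact ih (ds ++ [c])

-- ===== VERDICT (by name: the statement is the Claim_ definition above) =====
theorem parse_boolean_lines_py_spec : Claim_equal_parse_boolean_lines_py := by
  intro text criteria _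
  unfold Spec_parse_boolean_lines_py parse_boolean_lines_py parse_boolean_lines_py_alt
  have hinit := pvInit criteria []
  simp only [List.map_nil] at hinit
  have hks0 : criteria.foldl PySem.Set.add [] = PySem.List.dedup criteria := by
    rw [PySem.List.dedup_eq_ofList]; rfl
  rw [hks0] at hinit
  show (PySem.Dict.items ((PySem.Str.splitlines text).foldl _
      (criteria.foldl (fun d criterion => PySem.Dict.insert d criterion false) PySem.Dict.empty))) = _
  rw [show (PySem.Dict.empty : PySem.Dict String Bool) = ⟨[]⟩ from rfl, hinit,
    pvOuter criteria (PySem.List.dedup criteria)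
      (fun c hc => (PySem.List.mem_dedup criteria c).1 hc)
      (fun c hc => (PySem.List.mem_dedup criteria c).2 hc)
      (PySem.Str.splitlines text) (fun _ => false)]
  apply List.map_congr_left
  intro k _
  rw [pvFwd_eq_pvRevD, pvRevSearch_eq_pvRevD]
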